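-- pv_equiv track=rewrite | github.com/HSM316/LLM_Wikipedia | LLM_Impact/Clean_First.py | remove_nested_tags
-- ===== SOURCE A (Python) =====
-- def remove_nested_tags(text):
--     stack = []
--     i = 0
--     while i < len(text):
--         if text[i:i+2] == '[[':
--             stack.append(i)
--             i += 2
--         elif text[i:i+2] == ']]' and stack:
--             start = stack.pop()
--
--             if text[start:].lower().startswith('[[image:') or text[start:].lower().startswith('[[file:') or text[start:].lower().startswith('[[category:'):
--                 text = text[:start] + text[i+2:]
--                 i = start
--             else:
--                 i += 2
--         else:
--             i += 1
--
--     return text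
-- ===== SOURCE B (Python) =====
-- def remove_nested_tags(text):
--     # One O(n) pass with a stack of content buffers instead of an index stack
--     # plus repeated whole-string re-slicing.
--     out = []          # finished top-level pieces
--     stack = []        # one buffer (list of pieces) per open '[['
--     i = 0
--     n = len(text)
--     while i < n:
--         if text.startswith('[[', i):
--             stack.append([])
--             i += 2
--         elif text.startswith(']]', i) and stack:
--             s = ''.join(stack.pop())
--             if not s.lower().startswith(('image:', 'file:', 'category:')):
--                 (stack[-1] if stack else out).append('[[' + s + ']]')
--             i += 2
--         else:
--             (stack[-1] if stack else out).append(text[i])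
--             i += 1
--     res = ''.join(out)
--     for parts in stack:                 # unmatched '[[' stay verbatim
--         res += '[[' + ''.join(parts)
--     return res
-- ===== Notes on version B (the rewrite author's own statement) =====
-- stated objective: alternative
-- what changed: A keeps a stack of open-bracket indices and, on each removed tag, rebuilds the whole string by slicing and rescans from the removal point; B makes one left-to-right pass over the characters maintaining a stack of content buffers, discarding a finished buffer when it names an image/file/category link and otherwise appending the reconstructed link to the enclosing buffer, so the string is never re-sliced.
import Mathlib
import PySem

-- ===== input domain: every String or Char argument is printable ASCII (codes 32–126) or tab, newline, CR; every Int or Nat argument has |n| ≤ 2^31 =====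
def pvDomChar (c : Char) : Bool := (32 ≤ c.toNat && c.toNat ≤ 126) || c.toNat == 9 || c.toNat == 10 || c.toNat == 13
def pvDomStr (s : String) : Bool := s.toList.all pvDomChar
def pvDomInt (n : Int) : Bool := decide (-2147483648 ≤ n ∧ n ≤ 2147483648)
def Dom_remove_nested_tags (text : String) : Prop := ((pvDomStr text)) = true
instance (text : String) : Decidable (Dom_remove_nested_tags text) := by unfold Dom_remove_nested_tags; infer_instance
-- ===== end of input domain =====

-- B replaces A's index stack and whole-string re-slicing by a single pass with a
-- stack of content buffers (objective: alternative/simpler single-pass structure).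

-- ===== PORT A =====
-- text[start:].lower().startswith('[[image:') or … ('[[file:') or … ('[[category:')
def pvIsTagA (t : List Char) : Bool :=
  PySem.Chars.startswith (PySem.Chars.lower t) "[[image:".toList
  || PySem.Chars.startswith (PySem.Chars.lower t) "[[file:".toList
  || PySem.Chars.startswith (PySem.Chars.lower t) "[[category:".toList

-- A's while-loop: state (text, stack, i); slices text[i:i+2] are (text.drop i).take 2
-- (exact for the Nat indices the loop uses).
def pvALoop (text : List Char) (stack : List Nat) (i : Nat) : List Char :=
  if _h : i < text.length then
    if (text.drop i).take 2 = ['[', '['] then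
      pvALoop text (i :: stack) (i + 2)
    else if h2 : (text.drop i).take 2 = [']', ']'] then
      match stack with
      | start :: stk =>
        if pvIsTagA (text.drop start) then
          -- text = text[:start] + text[i+2:]; i = start
          pvALoop (text.take start ++ text.drop (i + 2)) stk start
        else
          pvALoop text stk (i + 2)
      | [] => pvALoop text [] (i + 1)   -- ']]' but empty stack: the 'and stack' fails, else-branch i += 1
    else
      pvALoop text stack (i + 1)
  else text
termination_by text.length - i
decreasing_by
  · omega
  · have hl : 2 ≤ text.length - i := by
      have := congrArg List.length h2
      simp [List.length_take] at this
      omega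
    simp [List.length_take]
    omega
  · omega
  · omega
  · omega

def remove_nested_tags (text : String) : String :=
  String.ofList (pvALoop text.toList [] 0)

-- ===== PORT B =====
-- s.lower().startswith(('image:', 'file:', 'category:'))
def pvIsTagB (s : List Char) : Bool :=
  PySem.Chars.startswith (PySem.Chars.lower s) "image:".toList
  || PySem.Chars.startswith (PySem.Chars.lower s) "file:".toList
  || PySem.Chars.startswith (PySem.Chars.lower s) "category:".toList

-- the final flush: res = ''.join(out); for parts in stack: res += '[[' + ''.join(parts)
-- (bufs is top-first here, so a left fold prepending '[[' ++ b builds the same string)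
def pvFlushB (bufs : List (List Char)) : List Char :=
  bufs.foldl (fun acc b => '[' :: '[' :: b ++ acc) []

-- B's while-loop: state (remaining input, stack of open buffers (top first), out)
def pvBLoop (cs : List Char) (bufs : List (List Char)) (out : List Char) : List Char :=
  match cs, bufs with
  | [], bufs => out ++ pvFlushB bufs
  | c :: rest, top :: more =>
    if c = '[' ∧ rest.take 1 = ['['] then
      pvBLoop (rest.drop 1) ([] :: top :: more) out
    else if c = ']' ∧ rest.take 1 = [']'] then
      if pvIsTagB top then pvBLoop (rest.drop 1) more out
      else
        match more with
        | nxt :: more' => pvBLoop (rest.drop 1) ((nxt ++ '[' :: '[' :: top ++ [']', ']']) :: more') out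
        | [] => pvBLoop (rest.drop 1) [] (out ++ '[' :: '[' :: top ++ [']', ']'])
    else
      pvBLoop rest ((top ++ [c]) :: more) out
  | c :: rest, [] =>
    if c = '[' ∧ rest.take 1 = ['['] then
      pvBLoop (rest.drop 1) [[]] out
    else
      pvBLoop rest [] (out ++ [c])
termination_by cs.length
decreasing_by all_goals (simp only [List.length_drop, List.length_cons]; omega)

def remove_nested_tags_alt (text : String) : String :=
  String.ofList (pvBLoop text.toList [] [])

-- ===== PRECONDITION & SPEC =====
def Spec_remove_nested_tags (text : String) (out : String) : Prop := out = remove_nested_tags_alt text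
instance (text : String) (out : String) : Decidable (Spec_remove_nested_tags text out) := by unfold Spec_remove_nested_tags; infer_instance

-- ===== CLAIM (what is proved, stated in full; the proofs are below) =====
def Claim_equal_remove_nested_tags : Prop := ∀ (text : String), Dom_remove_nested_tags text → Spec_remove_nested_tags text (remove_nested_tags text)

-- ===== LEMMAS AND PROOFS =====

-- slice text[a:b] for Nat bounds
def pvSl (t : List Char) (a b : Nat) : List Char := (t.drop a).take (b - a)

-- invariant tying A's index stack to the text: entries descend by ≥ 2, each marks a '[['
def pvInv (t : List Char) : List Nat → Nat → Prop
  | [], _ => True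
  | s :: stk, i => s + 2 ≤ i ∧ (t.drop s).take 2 = ['[', '['] ∧ pvInv t stk s

-- B's buffer stack, reconstructed from A's state
def pvBufs (t : List Char) : List Nat → Nat → List (List Char)
  | [], _ => []
  | s :: stk, i => pvSl t (s + 2) i :: pvBufs t stk s

-- B's out, reconstructed from A's state
def pvRoot (t : List Char) : List Nat → Nat → List Char
  | [], i => t.take i
  | s :: stk, _ => pvRoot t stk s

theorem pvSl_append (t : List Char) {a b c : Nat} (hab : a ≤ b) (hbc : b ≤ c) :
    pvSl t a c = pvSl t a b ++ pvSl t b c := by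
  unfold pvSl
  have h1 : c - a = (b - a) + (c - b) := by omega
  rw [h1, List.take_add, List.drop_drop]
  have h2 : a + (b - a) = b := by omega
  rw [h2]

theorem pvTake_eq_take_append_sl (t : List Char) {a b : Nat} (hab : a ≤ b) :
    t.take b = t.take a ++ pvSl t a b := by
  unfold pvSl
  have h1 : b = a + (b - a) := by omega
  conv_lhs => rw [h1]
  rw [List.take_add]

theorem pvTwo_split {t : List Char} {i : Nat} {a b : Char}
    (h : (t.drop i).take 2 = [a, b]) : t.drop i = a :: b :: t.drop (i + 2) := by
  have := (List.take_append_drop 2 (t.drop i)).symm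
  rw [h] at this
  rw [this, List.drop_drop]
  norm_num [Nat.add_comm]

theorem pvTake2_cons {c : Char} {rest : List Char} {a b : Char} :
    ((c :: rest).take 2 = [a, b]) ↔ (c = a ∧ rest.take 1 = [b]) := by
  constructor
  · intro h
    have : c :: rest.take 1 = [a, b] := by simpa using h
    simp at this
    exact ⟨this.1, this.2⟩
  · rintro ⟨rfl, h⟩
    simp [List.take_succ_cons, h]

-- a prefix containing no ']' cannot reach past the closing ']]'
theorem pvPrefix_stop {p : List Char} (hp : ']' ∉ p) :
    ∀ (s r : List Char), (p <+: s ++ ']' :: r) ↔ p <+: s := by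
  induction p with
  | nil => intro s r; simp
  | cons q p' ih =>
    intro s r
    cases s with
    | nil =>
      simp only [List.nil_append]
      constructor
      · rintro h
        rcases List.cons_prefix_cons.mp h with ⟨rfl, _⟩
        exact absurd List.mem_cons_self hp
      · intro h; exact absurd (List.prefix_nil.mp h) (by simp)
    | cons x s' =>
      simp only [List.cons_append, List.cons_prefix_cons]
      constructor
      · rintro ⟨rfl, h⟩
        exact ⟨rfl, (ih (by simp at hp; tauto) s' r).mp h⟩
      · rintro ⟨rfl, h⟩
        exact ⟨rfl, (ih (by simp at hp; tauto) s' r).mpr h⟩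

-- the tag test A makes on text[start:] equals the test B makes on the buffer content
theorem pvSW (L R p : List Char) (hp : ']' ∉ p) :
    PySem.Chars.startswith ('[' :: '[' :: (L ++ ']' :: ']' :: R)) ('[' :: '[' :: p)
      = PySem.Chars.startswith L p := by
  have key : ('[' :: '[' :: p <+: '[' :: '[' :: (L ++ ']' :: ']' :: R)) ↔ p <+: L := by
    simp only [List.cons_prefix_cons, true_and]
    exact pvPrefix_stop hp L (']' :: R)
  cases hb : PySem.Chars.startswith L p with
  | false =>
    refine Bool.eq_false_iff.mpr ?_
    intro h
    have := key.mp ((PySem.Chars.startswith_iff _ _).mp h)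
    rw [← PySem.Chars.startswith_iff _ _, hb] at this
    exact Bool.false_ne_true this
  | true =>
    exact (PySem.Chars.startswith_iff _ _).mpr (key.mpr ((PySem.Chars.startswith_iff _ _).mp hb))

theorem pvTag_eq (b r : List Char) :
    pvIsTagA ('[' :: '[' :: b ++ ']' :: ']' :: r) = pvIsTagB b := by
  unfold pvIsTagA pvIsTagB
  have hlow : PySem.Chars.lower ('[' :: '[' :: b ++ ']' :: ']' :: r)
      = '[' :: '[' :: (PySem.Chars.lower b ++ ']' :: ']' :: PySem.Chars.lower r) := by
    simp [PySem.Chars.lower]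
    exact ⟨by decide, by decide⟩
  rw [hlow,
      show ("[[image:".toList) = '[' :: '[' :: "image:".toList from rfl,
      show ("[[file:".toList) = '[' :: '[' :: "file:".toList from rfl,
      show ("[[category:".toList) = '[' :: '[' :: "category:".toList from rfl,
      pvSW _ _ _ (by decide), pvSW _ _ _ (by decide), pvSW _ _ _ (by decide)]

theorem pvSl_self (t : List Char) (i : Nat) : pvSl t i i = [] := by simp [pvSl]

theorem pvSl_two (t : List Char) (i : Nat) : pvSl t i (i + 2) = (t.drop i).take 2 := by
  simp [pvSl]

theorem pvDrop_succ (t : List Char) (i : Nat) : t.drop (i + 1) = (t.drop i).drop 1 := by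
  rw [List.drop_drop, Nat.add_comm]

theorem pvDrop_sl (t : List Char) {a i : Nat} (h : a ≤ i) :
    t.drop a = pvSl t a i ++ t.drop i := by
  unfold pvSl
  have : t.drop i = (t.drop a).drop (i - a) := by rw [List.drop_drop]; congr 1; omega
  rw [this, List.take_append_drop]

theorem pvTake_succ_of_drop {t : List Char} {i : Nat} {c : Char} {rest : List Char}
    (h : t.drop i = c :: rest) : t.take (i + 1) = t.take i ++ [c] := by
  rw [List.take_succ]
  have : t[i]? = some c := by
    have h0 : (t.drop i)[0]? = t[i + 0]? := List.getElem?_drop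
    rw [h, Nat.add_zero] at h0
    simpa using h0.symm
  simp [this]

theorem pvTake_prefix_eq (t X : List Char) {s j : Nat} (hj : j ≤ s) (hs : s ≤ t.length) :
    (t.take s ++ X).take j = t.take j := by
  rw [List.take_append]
  have hlen : (t.take s).length = s := by simp [List.length_take]; omega
  rw [hlen]
  have : j - s = 0 := by omega
  simp [this, List.take_take, Nat.min_eq_left hj]

theorem pvSl_prefix_eq (t X : List Char) {s a b : Nat} (hb : b ≤ s) (hs : s ≤ t.length) :
    pvSl (t.take s ++ X) a b = pvSl t a b := by
  unfold pvSl
  by_cases hab : a ≤ b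
  · rw [List.drop_append, List.take_append]
    have hlen : (t.take s).length = s := by simp [List.length_take]; omega
    rw [hlen]
    have hdl : ((t.take s).drop a).length = s - a := by simp [List.length_drop, List.length_take]; omega
    rw [hdl]
    have h1 : b - a - (s - a) = 0 := by omega
    rw [List.drop_take]
    have h2 : ((t.drop a).take (s - a)).take (b - a) = (t.drop a).take (b - a) := by
      rw [List.take_take]; congr 1; omega
    by_cases has : a ≤ s
    · simp [h1, h2]
    · omega
  · have : b - a = 0 := by omega
    simp [this]

theorem pvDrop_prefix (t X : List Char) {s : Nat} (hs : s ≤ t.length) :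
    (t.take s ++ X).drop s = X := by
  rw [List.drop_append]
  have hlen : (t.take s).length = s := by simp [List.length_take]; omega
  simp [hlen]

theorem pvInv_mono (t : List Char) : ∀ (stk : List Nat) {j j' : Nat}, j ≤ j' →
    pvInv t stk j → pvInv t stk j'
  | [], _, _, _, _ => trivial
  | s :: stk, j, j', h, ⟨h1, h2, h3⟩ => ⟨by omega, h2, h3⟩

theorem pvInv_cut (t X : List Char) {s : Nat} (hs : s ≤ t.length) :
    ∀ (stk : List Nat) (j : Nat), j ≤ s → pvInv t stk j → pvInv (t.take s ++ X) stk j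
  | [], _, _, _ => trivial
  | s' :: stk, j, hj, ⟨h1, h2, h3⟩ => by
    refine ⟨h1, ?_, pvInv_cut t X hs stk s' (by omega) h3⟩
    have := pvSl_prefix_eq t X (b := s' + 2) (a := s') (by omega) hs
    rw [pvSl_two, pvSl_two] at this
    rw [this, h2]

theorem pvBufs_cut (t X : List Char) {s : Nat} (hs : s ≤ t.length) :
    ∀ (stk : List Nat) (j : Nat), j ≤ s → pvInv t stk j → pvBufs (t.take s ++ X) stk j = pvBufs t stk j
  | [], _, _, _ => rfl
  | s' :: stk, j, hj, ⟨h1, _, h3⟩ => by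
    simp only [pvBufs]
    rw [pvSl_prefix_eq t X (by omega) hs, pvBufs_cut t X hs stk s' (by omega) h3]

theorem pvRoot_cut (t X : List Char) {s : Nat} (hs : s ≤ t.length) :
    ∀ (stk : List Nat) (j : Nat), j ≤ s → pvInv t stk j → pvRoot (t.take s ++ X) stk j = pvRoot t stk j
  | [], j, hj, _ => pvTake_prefix_eq t X hj hs
  | s' :: stk, j, hj, ⟨h1, _, h3⟩ => pvRoot_cut t X hs stk s' (by omega) h3

-- at the end of the pass, out ++ the flushed open buffers rebuild the final text
theorem pvRec (t : List Char) : ∀ (stk : List Nat) (i : Nat), pvInv t stk i → i ≤ t.length →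
    pvRoot t stk i ++ (pvBufs t stk i).foldl (fun acc b => '[' :: '[' :: b ++ acc) (t.drop i) = t
  | [], i, _, hi => by simp [pvRoot, pvBufs]
  | s :: stk, i, ⟨hs, h2, hinv⟩, hi => by
    simp only [pvRoot, pvBufs, List.foldl_cons]
    have hinit : '[' :: '[' :: (pvSl t (s + 2) i ++ t.drop i) = t.drop s := by
      rw [← pvDrop_sl t (by omega : s + 2 ≤ i)]
      exact (pvTwo_split h2).symm
    rw [show ('[' :: '[' :: pvSl t (s + 2) i ++ t.drop i) = '[' :: '[' :: (pvSl t (s + 2) i ++ t.drop i) from rfl, hinit]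
    exact pvRec t stk s hinv (by omega)

theorem pvDone (t : List Char) (stk : List Nat) (i : Nat) (hinv : pvInv t stk i) (hie : i = t.length) :
    pvBLoop (t.drop i) (pvBufs t stk i) (pvRoot t stk i) = t := by
  have hdrop : t.drop i = [] := by simp [hie]
  have hrec := pvRec t stk i hinv (le_of_eq hie)
  rw [hdrop] at hrec ⊢
  rw [pvBLoop.eq_def]
  simpa [pvFlushB] using hrec

theorem pvMain : ∀ (n : Nat) (t : List Char) (stk : List Nat) (i : Nat),
    t.length - i ≤ n → i ≤ t.length → pvInv t stk i →
    pvALoop t stk i = pvBLoop (t.drop i) (pvBufs t stk i) (pvRoot t stk i) := by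
  intro n
  induction n with
  | zero =>
    intro t stk i hn hi hinv
    have hie : i = t.length := by omega
    rw [pvALoop.eq_def]
    simp only [show ¬ i < t.length by omega, dif_neg, not_false_iff]
    exact (pvDone t stk i hinv hie).symm
  | succ n ih =>
    intro t stk i hn hi hinv
    by_cases hlt : i < t.length
    case neg =>
      have hie : i = t.length := by omega
      rw [pvALoop.eq_def]
      simp only [hlt, dif_neg, not_false_iff]
      exact (pvDone t stk i hinv hie).symm
    case pos =>
      by_cases h1 : (t.drop i).take 2 = ['[', '[']
      · -- '[[' : push
        have hlen2 : i + 2 ≤ t.length := by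
          have := congrArg List.length h1
          simp [List.length_take] at this
          omega
        have hd : t.drop i = '[' :: '[' :: t.drop (i + 2) := pvTwo_split h1
        rw [pvALoop.eq_def, dif_pos hlt, if_pos h1]
        have hih := ih t (i :: stk) (i + 2) (by omega) hlen2 ⟨le_refl _, h1, hinv⟩
        rw [hih]
        simp only [pvBufs, pvSl_self, pvRoot]
        rw [hd]
        conv_rhs => rw [pvBLoop.eq_def]
        cases hb : pvBufs t stk i with
        | nil => simp
        | cons top more => simp
      · by_cases h2 : (t.drop i).take 2 = [']', ']']
        · have hlen2 : i + 2 ≤ t.length := by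
            have := congrArg List.length h2
            simp [List.length_take] at this
            omega
          have hd : t.drop i = ']' :: ']' :: t.drop (i + 2) := pvTwo_split h2
          cases stk with
          | nil =>
            -- ']]' with empty stack: the 'and stack' fails, else branch: i += 1
            rw [pvALoop.eq_def, dif_pos hlt, if_neg h1, dif_pos h2]
            have hih := ih t [] (i + 1) (by omega) (by omega) trivial
            rw [hih]
            simp only [pvBufs, pvRoot]
            have hroot : t.take (i + 1) = t.take i ++ [']'] := pvTake_succ_of_drop hd
            have hdrop1 : t.drop (i + 1) = ']' :: t.drop (i + 2) := by
              rw [pvDrop_succ, hd]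
              rfl
            rw [hd]
            conv_rhs => rw [pvBLoop.eq_def]
            simp [hroot, hdrop1]
          | cons s stk' =>
            obtain ⟨hs, hbr, hinv'⟩ := hinv
            have hdecomp : t.drop s = '[' :: '[' :: (pvSl t (s + 2) i ++ ']' :: ']' :: t.drop (i + 2)) := by
              rw [pvTwo_split hbr]
              congr 2
              rw [pvDrop_sl t (by omega : s + 2 ≤ i), hd]
            have htag : pvIsTagA (t.drop s) = pvIsTagB (pvSl t (s + 2) i) := by
              rw [hdecomp]
              exact pvTag_eq _ _
            rw [pvALoop.eq_def, dif_pos hlt, if_neg h1, dif_pos h2]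
            -- B side: one close step
            have hB : pvBLoop (t.drop i) (pvBufs t (s :: stk') i) (pvRoot t (s :: stk') i)
                = if pvIsTagB (pvSl t (s + 2) i) then
                    pvBLoop (t.drop (i + 2)) (pvBufs t stk' s) (pvRoot t stk' s)
                  else
                    match pvBufs t stk' s with
                    | nxt :: more' => pvBLoop (t.drop (i + 2)) ((nxt ++ '[' :: '[' :: pvSl t (s + 2) i ++ [']', ']']) :: more') (pvRoot t stk' s)
                    | [] => pvBLoop (t.drop (i + 2)) [] (pvRoot t stk' s ++ '[' :: '[' :: pvSl t (s + 2) i ++ [']', ']']) := by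
              rw [hd]
              simp only [pvBufs, pvRoot]
              conv_lhs => rw [pvBLoop.eq_def]
              cases htg : pvIsTagB (pvSl t (s + 2) i) with
              | true => simp [htg]
              | false =>
                cases hb : pvBufs t stk' s with
                | nil => simp [htg]
                | cons nxt more' => simp [htg]
            dsimp only
            rw [hB, htag]
            cases htg : pvIsTagB (pvSl t (s + 2) i) with
            | true =>
              -- removal: text = text[:start] + text[i+2:], i = start
              simp only [reduceIte]
              have hslen : s ≤ t.length := by omega
              have ht'len : (t.take s ++ t.drop (i + 2)).length = s + (t.length - (i + 2)) := by
                simp [List.length_take, List.length_drop]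
                omega
              have hih := ih (t.take s ++ t.drop (i + 2)) stk' s (by omega) (by omega)
                (pvInv_cut t (t.drop (i + 2)) hslen stk' s (le_refl _) hinv')
              rw [hih, pvBufs_cut t _ hslen stk' s (le_refl _) hinv',
                  pvRoot_cut t _ hslen stk' s (le_refl _) hinv',
                  pvDrop_prefix t _ hslen]
            | false =>
              -- keep: merge the closed '[[…]]' into the enclosing buffer / out
              simp only [Bool.false_eq_true, reduceIte]
              have hih := ih t stk' (i + 2) (by omega) hlen2
                (pvInv_mono t stk' (by omega) hinv')
              rw [hih]
              cases stk' with
              | nil =>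
                simp only [pvBufs, pvRoot]
                congr 1
                rw [pvTake_eq_take_append_sl t (by omega : s ≤ i + 2),
                    pvSl_append t (by omega : s ≤ s + 2) (by omega : s + 2 ≤ i + 2),
                    pvSl_append t (by omega : s + 2 ≤ i) (by omega : i ≤ i + 2),
                    pvSl_two, pvSl_two, hbr, h2]
                simp
              | cons s' rest' =>
                obtain ⟨hs', hbr', hinv''⟩ := hinv'
                simp only [pvBufs, pvRoot]
                congr 2
                rw [pvSl_append t (by omega : s' + 2 ≤ s) (by omega : s ≤ i + 2),
                    pvSl_append t (by omega : s ≤ s + 2) (by omega : s + 2 ≤ i + 2),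
                    pvSl_append t (by omega : s + 2 ≤ i) (by omega : i ≤ i + 2),
                    pvSl_two, pvSl_two, hbr, h2]
                simp
        · -- single character: else branch, i += 1
          obtain ⟨c, rest, hd⟩ : ∃ c rest, t.drop i = c :: rest := by
            cases hdd : t.drop i with
            | nil =>
              have := congrArg List.length hdd
              simp [List.length_drop] at this
              omega
            | cons c rest => exact ⟨c, rest, rfl⟩
          have hdrop1 : t.drop (i + 1) = rest := by
            rw [pvDrop_succ, hd]
            rfl
          have hc1 : ¬(c = '[' ∧ rest.take 1 = ['[']) := fun h => h1 (by rw [hd]; exact pvTake2_cons.mpr h)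
          have hc2 : ¬(c = ']' ∧ rest.take 1 = [']']) := fun h => h2 (by rw [hd]; exact pvTake2_cons.mpr h)
          rw [pvALoop.eq_def, dif_pos hlt, if_neg h1, dif_neg h2]
          have hih := ih t stk (i + 1) (by omega) (by omega)
            (pvInv_mono t stk (by omega) hinv)
          rw [hih]
          cases stk with
          | nil =>
            simp only [pvBufs, pvRoot]
            rw [hd]
            conv_rhs => rw [pvBLoop.eq_def]
            simp [hc1, hdrop1, pvTake_succ_of_drop hd]
          | cons s stk' =>
            obtain ⟨hs, hbr, hinv'⟩ := hinv
            simp only [pvBufs, pvRoot]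
            rw [hd]
            conv_rhs => rw [pvBLoop.eq_def]
            simp only [hc1, if_neg, not_false_iff, hc2, hdrop1]
            have hsl : pvSl t (s + 2) (i + 1) = pvSl t (s + 2) i ++ [c] := by
              rw [pvSl_append t (by omega : s + 2 ≤ i) (by omega : i ≤ i + 1)]
              congr 1
              unfold pvSl
              rw [show i + 1 - i = 1 by omega, hd]
              rfl
            rw [hsl]

-- ===== VERDICT (by name: the statement is the Claim_ definition above) =====
theorem remove_nested_tags_spec : Claim_equal_remove_nested_tags := by
  intro text _
  unfold Spec_remove_nested_tags remove_nested_tags remove_nested_tags_alt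
  have := pvMain text.toList.length text.toList [] 0 (by omega) (by omega) trivial
  simp only [pvBufs, pvRoot, List.drop_zero, List.take_zero] at this
  rw [this]
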